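-- pv_equiv track=rewrite | github.com/TabeaSonnenschein/Spatial-Agent-based-Modeling-of-Urban-Health-Interventions | NLP Knowledge Extraction and Synthesis/temp/RelationInference.py | divide_words_by_split_proposition
-- ===== SOURCE A (Python) =====
-- def divide_words_by_split_proposition(split_prepos, word_indices):
--     nested_list = []
--     indx = -1
--     for prepos in split_prepos:
--         nested_list.append([i for i, v in enumerate(word_indices) if prepos > v > indx])
--         indx = prepos
--     nested_list.append([i for i, v in enumerate(word_indices) if indx < v])
--     return nested_list
-- ===== SOURCE B (Python) =====
-- def divide_words_by_split_proposition(split_prepos, word_indices):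
--     # Column-wise single pass: precompute each bin's (low, high) bounds once,
--     # then walk word_indices once, dropping each position into every bin whose
--     # open interval contains its value.
--     bounds = list(zip([-1] + split_prepos, split_prepos + [None]))
--     bins = [[] for _ in bounds]
--     for i, v in enumerate(word_indices):
--         for b, (lo, hi) in zip(bins, bounds):
--             if lo < v and (hi is None or v < hi):
--                 b.append(i)
--     return bins
-- ===== Notes on version B (the rewrite author's own statement) =====
-- stated objective: alternative
-- what changed: B precomputes each bin's (low, high) bounds once and makes a single transposed pass over word_indices, appending each position to every bin whose open interval contains its value, instead of A's separate full scan of word_indices per preposition with a running lower bound.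
import Mathlib
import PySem

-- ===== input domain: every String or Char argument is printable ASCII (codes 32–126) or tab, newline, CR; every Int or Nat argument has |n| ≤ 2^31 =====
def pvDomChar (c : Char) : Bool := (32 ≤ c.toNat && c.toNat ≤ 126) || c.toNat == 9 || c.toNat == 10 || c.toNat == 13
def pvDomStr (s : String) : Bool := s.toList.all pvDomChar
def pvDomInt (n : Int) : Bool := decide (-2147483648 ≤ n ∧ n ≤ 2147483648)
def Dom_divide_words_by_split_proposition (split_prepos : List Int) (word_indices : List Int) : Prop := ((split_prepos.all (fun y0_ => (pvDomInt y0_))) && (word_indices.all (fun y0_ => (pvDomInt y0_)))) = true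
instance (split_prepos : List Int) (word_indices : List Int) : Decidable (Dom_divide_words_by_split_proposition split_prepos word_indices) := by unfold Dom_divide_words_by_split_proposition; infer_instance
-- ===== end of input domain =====

-- B changes the traversal: one pass over word_indices dropping each position into every
-- precomputed (low, high) bin, instead of A's one full scan of word_indices per preposition
-- (objective: alternative; same asymptotic cost, order of the result proved unchanged).

-- ===== PORT A =====
-- loop body of A: append the bin for 'prepos' (scan of enumerate(word_indices)), indx := prepos
def pvStepA (word_indices : List Int) (st : List (List Int) × Int) (prepos : Int) : List (List Int) × Int :=
  (st.1 ++ [((PySem.List.enumerate word_indices).filter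
      (fun iv => decide (prepos > iv.2 ∧ iv.2 > st.2))).map (·.1)],
   prepos)

def divide_words_by_split_proposition (split_prepos : List Int) (word_indices : List Int) : List (List Int) :=
  -- nested_list = []; indx = -1; for prepos in split_prepos: …; append the final bin
  let st := split_prepos.foldl (pvStepA word_indices) ([], -1)
  st.1 ++ [((PySem.List.enumerate word_indices).filter (fun iv => decide (st.2 < iv.2))).map (·.1)]

-- ===== PORT B =====
-- 'lo < v and (hi is None or v < hi)'
def pvCond (p : Int × Option Int) (v : Int) : Bool :=
  p.1 < v && (match p.2 with | none => true | some h => v < h)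

def divide_words_by_split_proposition_alt (split_prepos : List Int) (word_indices : List Int) : List (List Int) :=
  -- bounds = list(zip([-1] + split_prepos, split_prepos + [None]))
  let bounds : List (Int × Option Int) := List.zip ((-1) :: split_prepos) (split_prepos.map some ++ [none])
  -- bins = [[] for _ in bounds]
  let bins : List (List Int) := bounds.map (fun _ => [])
  -- for i, v in enumerate(word_indices): for b, (lo, hi) in zip(bins, bounds): if …: b.append(i)
  (PySem.List.enumerate word_indices).foldl
    (fun bins iv =>
      List.zipWith (fun (b : List Int) p => if pvCond p iv.2 then b ++ [iv.1] else b) bins bounds)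
    bins

-- ===== PRECONDITION & SPEC =====
def Spec_divide_words_by_split_proposition (split_prepos : List Int) (word_indices : List Int) (out : List (List Int)) : Prop := out = divide_words_by_split_proposition_alt split_prepos word_indices
instance (split_prepos : List Int) (word_indices : List Int) (out : List (List Int)) : Decidable (Spec_divide_words_by_split_proposition split_prepos word_indices out) := by unfold Spec_divide_words_by_split_proposition; infer_instance

-- ===== CLAIM (what is proved, stated in full; the proofs are below) =====
def Claim_equal_divide_words_by_split_proposition : Prop := ∀ (split_prepos : List Int) (word_indices : List Int), Dom_divide_words_by_split_proposition split_prepos word_indices → Spec_divide_words_by_split_proposition split_prepos word_indices (divide_words_by_split_proposition split_prepos word_indices)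

-- ===== LEMMAS AND PROOFS =====

-- the contents of the bin with bounds p, as a filter of the enumerated word list
def pvFilt (word_indices : List Int) (p : Int × Option Int) : List Int :=
  ((PySem.List.enumerate word_indices).filter (fun iv => pvCond p iv.2)).map (·.1)

-- two zipWiths against the same right list fuse
lemma zipWith_zipWith_same {α β γ δ : Type} (f : γ → β → δ) (g : α → β → γ) :
    ∀ (l : List α) (r : List β),
      List.zipWith f (List.zipWith g l r) r = List.zipWith (fun a b => f (g a b) b) l r := by
  intro l
  induction l with
  | nil => intro r; simp
  | cons a l ih =>
    intro r
    cases r with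
    | nil => simp
    | cons b r => simp [ih]

-- zipWith that keeps the left entry is the identity (for equal lengths)
lemma zipWith_id_left {α : Type} :
    ∀ (bins : List (List Int)) (bounds : List α), bins.length = bounds.length →
      List.zipWith (fun b (_ : α) => b) bins bounds = bins := by
  intro bins
  induction bins with
  | nil => intro bounds _; simp
  | cons b bins ih =>
    intro bounds h
    cases bounds with
    | nil => simp at h
    | cons p bounds =>
      simp only [List.length_cons, Nat.add_right_cancel_iff] at h
      simp [ih bounds h]

-- characterisation of B's fold: each bin accumulates the filter of the remaining words
lemma foldB_char (bounds : List (Int × Option Int)) :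
    ∀ (ws : List (Int × Int)) (bins : List (List Int)), bins.length = bounds.length →
      ws.foldl (fun bins iv =>
          List.zipWith (fun (b : List Int) p => if pvCond p iv.2 then b ++ [iv.1] else b) bins bounds)
        bins
      = List.zipWith (fun b p => b ++ ((ws.filter (fun iv => pvCond p iv.2)).map (·.1))) bins bounds := by
  intro ws
  induction ws with
  | nil =>
    intro bins h
    simp only [List.foldl_nil, List.filter_nil, List.map_nil, List.append_nil]
    exact (zipWith_id_left bins bounds h).symm
  | cons w ws ih =>
    intro bins h
    have hlen : (List.zipWith (fun (b : List Int) p => if pvCond p w.2 then b ++ [w.1] else b) bins bounds).length = bounds.length := by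
      simp [List.length_zipWith, h]
    simp only [List.foldl_cons, ih _ hlen, zipWith_zipWith_same]
    congr 1
    funext b p
    by_cases hc : pvCond p w.2 = true <;> simp [hc]

-- B equals the map of per-bin filters over the bounds
lemma B_eq_map (split_prepos word_indices : List Int) :
    divide_words_by_split_proposition_alt split_prepos word_indices
      = (List.zip ((-1) :: split_prepos) (split_prepos.map some ++ [none])).map
          (pvFilt word_indices) := by
  unfold divide_words_by_split_proposition_alt
  have h := foldB_char (List.zip ((-1) :: split_prepos) (split_prepos.map some ++ [none]))
      (PySem.List.enumerate word_indices)
      ((List.zip ((-1) :: split_prepos) (split_prepos.map some ++ [none])).map (fun _ => []))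
      (by simp)
  simp only [h]
  generalize (List.zip ((-1) :: split_prepos) (split_prepos.map some ++ [none])) = bounds
  induction bounds with
  | nil => simp
  | cons p bounds ih =>
    simp only [List.map_cons, List.zipWith_cons_cons, ih]
    simp [pvFilt]

-- the two last-bin predicates agree
lemma filt_last (word_indices : List Int) (indx : Int) :
    ((PySem.List.enumerate word_indices).filter (fun iv => decide (indx < iv.2))).map (·.1)
      = pvFilt word_indices (indx, none) := by
  unfold pvFilt
  congr 1
  apply List.filter_congr
  intro iv _
  simp [pvCond]

-- characterisation of A's fold, for any accumulator and current lower bound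
lemma foldA_char (word_indices : List Int) :
    ∀ (sp : List Int) (acc : List (List Int)) (indx : Int),
      (sp.foldl (pvStepA word_indices) (acc, indx)).1
        ++ [pvFilt word_indices ((sp.foldl (pvStepA word_indices) (acc, indx)).2, none)]
      = acc ++ (List.zip (indx :: sp) (sp.map some ++ [none])).map (pvFilt word_indices) := by
  intro sp
  induction sp with
  | nil =>
    intro acc indx
    simp
  | cons p sp ih =>
    intro acc indx
    simp only [List.foldl_cons, pvStepA]
    rw [ih]
    simp [List.zip_cons_cons, pvFilt, pvCond, Bool.and_comm]

-- ===== VERDICT (by name: the statement is the Claim_ definition above) =====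
theorem divide_words_by_split_proposition_spec : Claim_equal_divide_words_by_split_proposition := by
  intro split_prepos word_indices _
  unfold Spec_divide_words_by_split_proposition
  rw [B_eq_map]
  show (split_prepos.foldl (pvStepA word_indices) ([], -1)).1
      ++ [((PySem.List.enumerate word_indices).filter
          (fun iv => decide ((split_prepos.foldl (pvStepA word_indices) ([], -1)).2 < iv.2))).map (·.1)]
    = _
  rw [filt_last]
  exact foldA_char word_indices split_prepos [] (-1)
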